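-- pv_equiv track=rewrite | github.com/ansu7514/Algorithm-Study | 프로그래머스/unrated/181918. 배열 만들기 4/배열 만들기 4.py | solution
-- ===== SOURCE A (Python) =====
-- def solution(arr):
--     stk = []
--     i = 0
--
--     while i < len(arr):
--         if not stk:
--             stk.append(arr[i])
--         elif stk[-1] < arr[i]:
--             stk.append(arr[i])
--         elif stk[-1] >= arr[i]:
--             stk.pop()
--             i -= 1
--         i += 1
--
--     return stk
-- ===== SOURCE B (Python) =====
-- def solution(arr):
--     res = []
--     m = None
--     for x in reversed(arr):
--         if m is None or x < m:
--             res.append(x)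
--             m = x
--     return res[::-1]
-- ===== Notes on version B (the rewrite author's own statement) =====
-- stated objective: alternative
-- what changed: Replaces the monotonic stack (push/pop with index rewinding) by a single right-to-left scan that keeps exactly the elements strictly below the running suffix minimum, then reverses the result; no stack and no pops at all.
import Mathlib
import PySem

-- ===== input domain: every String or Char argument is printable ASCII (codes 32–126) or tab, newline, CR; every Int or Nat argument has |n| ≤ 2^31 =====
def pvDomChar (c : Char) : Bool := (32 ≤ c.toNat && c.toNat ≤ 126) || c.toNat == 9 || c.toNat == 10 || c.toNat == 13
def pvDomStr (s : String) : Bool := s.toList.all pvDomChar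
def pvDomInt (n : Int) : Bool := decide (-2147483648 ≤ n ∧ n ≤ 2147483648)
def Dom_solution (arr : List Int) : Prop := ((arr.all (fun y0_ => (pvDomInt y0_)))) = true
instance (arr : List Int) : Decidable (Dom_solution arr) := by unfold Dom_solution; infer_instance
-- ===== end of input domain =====

-- B drops the stack entirely: a single right-to-left scan keeps exactly the elements strictly
-- below the running suffix minimum, then reverses; an alternative stack-free algorithm, same O(n).

-- ===== PORT A =====
-- A's single while loop over index i: push when stack empty or top < arr[i]; otherwise pop and redo the same i.
def solutionLoop (arr : List Int) (stk : List Int) (i : Nat) : List Int :=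
  if h : i < arr.length then
    let x := arr[i]
    match hl : stk.getLast? with
    | none => solutionLoop arr (stk ++ [x]) (i + 1)          -- if not stk
    | some t =>
      if t < x then solutionLoop arr (stk ++ [x]) (i + 1)    -- elif stk[-1] < arr[i]
      else if t ≥ x then solutionLoop arr stk.dropLast i     -- elif stk[-1] >= arr[i]: pop; i -= 1 (then i += 1)
      else solutionLoop arr stk (i + 1)                      -- (unreachable in Python; kept for literal branch order)
  else stk
termination_by 2 * (arr.length - i) + stk.length
decreasing_by
  · simp; omega
  · simp; omega
  · have hne : stk ≠ [] := by intro hne2; simp [hne2] at hl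
    have : 0 < stk.length := List.length_pos_iff.mpr hne
    simp; omega
  · simp; omega

def solution (arr : List Int) : List Int := solutionLoop arr [] 0

-- ===== PORT B =====
-- for x in reversed(arr): if m is None or x < m: res.append(x); m = x  — then res[::-1]
def solution_alt (arr : List Int) : List Int :=
  (arr.reverse.foldl
    (fun (st : List Int × Option Int) x =>
      match st.2 with
      | none => (st.1 ++ [x], some x)
      | some mv => if x < mv then (st.1 ++ [x], some x) else st)
    ([], none)).1.reverse

-- ===== PRECONDITION & SPEC =====
def Spec_solution (arr : List Int) (out : List Int) : Prop := out = solution_alt arr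
instance (arr : List Int) (out : List Int) : Decidable (Spec_solution arr out) := by unfold Spec_solution; infer_instance

-- ===== CLAIM (what is proved, stated in full; the proofs are below) =====
def Claim_equal_solution : Prop := ∀ (arr : List Int), Dom_solution arr → Spec_solution arr (solution arr)

-- ===== LEMMAS AND PROOFS =====

-- proof-side helper: 'pop all tops ≥ x' — used only to characterise A's loop, not by either port
def popGE' (stk : List Int) (x : Int) : List Int :=
  match hl : stk.getLast? with
  | some t => if t ≥ x then popGE' stk.dropLast x else stk
  | none => stk
termination_by stk.length
decreasing_by
  have hne : stk ≠ [] := by intro hne; simp [hne] at hl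
  have : 0 < stk.length := List.length_pos_iff.mpr hne
  simp; omega

-- reference function: elements of r kept by B's scan, given current minimum m (none = no element yet)
def keepFrom (m : Option Int) (r : List Int) : List Int :=
  match r with
  | [] => []
  | x :: t =>
    match m with
    | none => x :: keepFrom (some x) t
    | some mv => if x < mv then x :: keepFrom (some x) t else keepFrom (some mv) t

-- B's foldl, seen through keepFrom
theorem bfold_eq_keepFrom (r : List Int) (res : List Int) (m : Option Int) :
    (r.foldl
      (fun (st : List Int × Option Int) x =>
        match st.2 with
        | none => (st.1 ++ [x], some x)
        | some mv => if x < mv then (st.1 ++ [x], some x) else st)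
      (res, m)).1 = res ++ keepFrom m r := by
  induction r generalizing res m with
  | nil => simp [keepFrom]
  | cons x t ih =>
    cases m with
    | none => simp [keepFrom, ih]
    | some mv =>
      by_cases h : x < mv
      · simp [keepFrom, h, ih]
      · simp [keepFrom, h, ih]

theorem keepFrom_lt (r : List Int) (v : Int) :
    ∀ y ∈ keepFrom (some v) r, y < v := by
  induction r generalizing v with
  | nil => simp [keepFrom]
  | cons x t ih =>
    intro y hy
    by_cases h : x < v
    · simp only [keepFrom, if_pos h, List.mem_cons] at hy
      rcases hy with rfl | hy
      · exact h
      · exact lt_trans (ih x y hy) h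
    · simp only [keepFrom, if_neg h] at hy
      exact ih v y hy

theorem keepFrom_pairwise (m : Option Int) (r : List Int) :
    (keepFrom m r).Pairwise (· > ·) := by
  induction r generalizing m with
  | nil => simp [keepFrom]
  | cons x t ih =>
    cases m with
    | none =>
      simp only [keepFrom, List.pairwise_cons]
      exact ⟨fun y hy => keepFrom_lt t x y hy, ih (some x)⟩
    | some mv =>
      by_cases h : x < mv
      · simp only [keepFrom, if_pos h, List.pairwise_cons]
        exact ⟨fun y hy => keepFrom_lt t x y hy, ih (some x)⟩
      · simp only [keepFrom, if_neg h]
        exact ih (some mv)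

-- lowering the bound to some x filters the kept list
theorem keepFrom_some_eq_filter (r : List Int) (x : Int) (m : Option Int)
    (hm : ∀ v, m = some v → x ≤ v) :
    keepFrom (some x) r = (keepFrom m r).filter (fun y => decide (y < x)) := by
  induction r generalizing x m with
  | nil => simp [keepFrom]
  | cons x0 t ih =>
    have filt_id : ∀ (v : Int), v < x →
        (keepFrom (some v) t).filter (fun y => decide (y < x)) = keepFrom (some v) t := by
      intro v hv
      apply List.filter_eq_self.mpr
      intro y hy
      simpa using lt_trans (keepFrom_lt t v y hy) hv
    cases m with
    | none =>
      by_cases h0 : x0 < x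
      · simp [keepFrom, h0, List.filter_cons, filt_id x0 h0]
      · simp only [keepFrom, List.filter_cons, if_neg h0]
        have : decide (x0 < x) = false := by simp [h0]
        rw [this]
        simp only [if_neg (by simp : ¬ (false = true))]
        exact ih x (some x0) (fun v hv => by cases hv; omega)
    | some mv =>
      have hxmv : x ≤ mv := hm mv rfl
      by_cases h1 : x0 < mv
      · simp only [keepFrom, if_pos h1]
        by_cases h0 : x0 < x
        · simp [h0, List.filter_cons, filt_id x0 h0]
        · simp only [if_neg h0, List.filter_cons]
          have : decide (x0 < x) = false := by simp [h0]
          rw [this]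
          simp only [if_neg (by simp : ¬ (false = true))]
          exact ih x (some x0) (fun v hv => by cases hv; omega)
      · have h0 : ¬ x0 < x := by omega
        simp only [keepFrom, if_neg h1]
        rw [if_neg h0]
        exact ih x (some mv) (fun v hv => by cases hv; omega)

theorem popGE_nil (x : Int) : popGE' [] x = [] := by
  rw [popGE']
  simp

theorem popGE_pop (stk : List Int) (x t : Int) (hl : stk.getLast? = some t) (ht : t ≥ x) :
    popGE' stk x = popGE' stk.dropLast x := by
  rw [popGE']
  split
  · simp_all
  · simp_all

theorem popGE_stop (stk : List Int) (x t : Int) (hl : stk.getLast? = some t) (ht : ¬ t ≥ x) :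
    popGE' stk x = stk := by
  rw [popGE']
  split
  · simp_all
  · simp_all

-- on a strictly increasing list, popping tops ≥ x is exactly filtering < x
theorem popGE_sorted (S : List Int) (x : Int) (hS : S.Pairwise (· < ·)) :
    popGE' S x = S.filter (fun y => decide (y < x)) := by
  induction S using List.reverseRecOn with
  | nil => simp [popGE_nil]
  | append_singleton S' t ih =>
    have hS' : S'.Pairwise (· < ·) := (List.pairwise_append.mp hS).1
    have hlt : ∀ y ∈ S', y < t := by
      intro y hy
      exact (List.pairwise_append.mp hS).2.2 y hy t (List.mem_singleton_self t)
    have hlast : (S' ++ [t]).getLast? = some t := by simp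
    by_cases hge : t ≥ x
    · rw [popGE_pop _ x t hlast hge]
      have hdrop : (S' ++ [t]).dropLast = S' := by simp
      rw [hdrop, ih hS', List.filter_append]
      have : ([t].filter (fun y => decide (y < x))) = [] := by
        simp [List.filter_cons]; omega
      simp [this]
    · rw [popGE_stop _ x t hlast hge]
      rw [List.filter_append]
      have ht : ([t].filter (fun y => decide (y < x))) = [t] := by
        simp [List.filter_cons]; omega
      have hself : S'.filter (fun y => decide (y < x)) = S' := by
        apply List.filter_eq_self.mpr
        intro y hy
        have := hlt y hy
        simp; omega
      rw [ht, hself]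

-- A's loop from index i equals the left fold of popGE' over the remaining suffix.
theorem loop_eq_fold (arr : List Int) (stk : List Int) (i : Nat) :
    solutionLoop arr stk i = (arr.drop i).foldl (fun s x => popGE' s x ++ [x]) stk := by
  rw [solutionLoop]
  by_cases h : i < arr.length
  · have hdrop : arr.drop i = arr[i] :: arr.drop (i + 1) := List.drop_eq_getElem_cons h
    simp only [h, dif_pos]
    split
    next hl =>
      have hstk : stk = [] := List.getLast?_eq_none_iff.mp hl
      subst hstk
      rw [loop_eq_fold arr ([] ++ [arr[i]]) (i + 1)]
      simp only [hdrop, List.foldl_cons, List.nil_append, popGE_nil]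
    next t hl =>
      by_cases hlt : t < arr[i]
      · rw [if_pos hlt, loop_eq_fold arr (stk ++ [arr[i]]) (i + 1)]
        simp only [hdrop, List.foldl_cons]
        rw [popGE_stop stk arr[i] t hl (by omega)]
      · have hge : t ≥ arr[i] := by omega
        rw [if_neg hlt, if_pos hge, loop_eq_fold arr stk.dropLast i]
        simp only [hdrop, List.foldl_cons]
        rw [popGE_pop stk arr[i] t hl hge]
  · simp only [h, dif_neg, not_false_iff]
    have : arr.drop i = [] := List.drop_eq_nil_of_le (by omega)
    simp [this]
termination_by 2 * (arr.length - i) + stk.length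
decreasing_by
  · simp; omega
  · simp; omega
  · rename_i t hl _
    have hne : stk ≠ [] := by intro h0; simp [h0] at hl
    have : 0 < stk.length := List.length_pos_iff.mpr hne
    simp; omega

-- the monotonic-stack fold equals the reversed suffix-min kept list
theorem fold_eq_keep (l : List Int) :
    l.foldl (fun s x => popGE' s x ++ [x]) [] = (keepFrom none l.reverse).reverse := by
  induction l using List.reverseRecOn with
  | nil => simp [keepFrom]
  | append_singleton l' x ih =>
    rw [List.foldl_append, List.foldl_cons, List.foldl_nil, ih]
    have hpair : ((keepFrom none l'.reverse).reverse).Pairwise (· < ·) := by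
      rw [List.pairwise_reverse]
      exact keepFrom_pairwise none l'.reverse
    rw [popGE_sorted _ x hpair]
    rw [List.reverse_append, List.reverse_cons, List.reverse_nil, List.nil_append]
    rw [show keepFrom none ([x] ++ l'.reverse) = x :: keepFrom (some x) l'.reverse from rfl]
    rw [keepFrom_some_eq_filter l'.reverse x none (by intro v hv; cases hv)]
    rw [List.reverse_cons, ← List.filter_reverse]

-- ===== VERDICT (by name: the statement is the Claim_ definition above) =====
theorem solution_spec : Claim_equal_solution := by
  intro arr _
  show solution arr = solution_alt arr
  rw [solution, solution_alt, loop_eq_fold, List.drop_zero, bfold_eq_keepFrom,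
    List.nil_append, fold_eq_keep]
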